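-- pv_equiv track=rewrite | github.com/miki-przygoda/genplan-template | backend/src/ver0/constraints.py | perimeter_of_cells
-- ===== SOURCE A (Python) =====
-- from typing import Dict, List, Tuple
--
-- Cell = tuple[int, int]  # (r, c)
--
-- def perimeter_of_cells(cells: List[Cell]) -> int:
--     """4-neighbour perimeter on a grid."""
--     S = set(cells)
--     per = 0
--     for (r, c) in S:
--         for dr, dc in [(-1,0),(1,0),(0,-1),(0,1)]:
--             if (r+dr, c+dc) not in S:
--                 per += 1
--     return per
-- ===== SOURCE B (Python) =====
-- def perimeter_of_cells(cells):
--     """4-neighbour perimeter on a grid."""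
--     S = set(cells)
--     adj = 0
--     for (r, c) in S:
--         if (r + 1, c) in S:
--             adj += 1
--         if (r, c + 1) in S:
--             adj += 1
--     return 4 * len(S) - 2 * adj
-- ===== Notes on version B (the rewrite author's own statement) =====
-- stated objective: faster
-- what changed: Instead of counting absent neighbours over all 4 directions per cell, B counts present shared edges by checking only the down and right neighbours and returns 4*len(S) - 2*adjacencies in closed form.
import Mathlib
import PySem

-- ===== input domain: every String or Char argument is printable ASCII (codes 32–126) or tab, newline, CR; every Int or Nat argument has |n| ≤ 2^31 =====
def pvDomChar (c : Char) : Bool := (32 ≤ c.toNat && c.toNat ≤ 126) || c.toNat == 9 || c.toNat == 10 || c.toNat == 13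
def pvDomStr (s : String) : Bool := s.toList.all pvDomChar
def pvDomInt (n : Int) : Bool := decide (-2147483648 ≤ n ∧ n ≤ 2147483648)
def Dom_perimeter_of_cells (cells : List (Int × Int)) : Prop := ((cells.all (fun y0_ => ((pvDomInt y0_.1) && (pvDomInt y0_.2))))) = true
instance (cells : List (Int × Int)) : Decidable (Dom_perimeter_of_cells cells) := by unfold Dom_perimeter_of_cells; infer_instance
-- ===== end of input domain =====

-- B replaces A's per-cell count of absent neighbours over 4 directions by a 2-direction
-- count of present shared edges plus the closed form 4*|S| - 2*adj (objective: faster, fewer lookups per cell).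


-- ===== PORT A =====
-- for (r,c) in S: for d in dirs: if (r+dr,c+dc) not in S: per += 1
-- (the iteration order over the Python set does not affect the sum)
def perimeter_of_cells (cells : List (Int × Int)) : Int :=
  let S := PySem.Set.ofList cells
  S.foldl (fun per rc =>
    ([((-1 : Int), (0 : Int)), (1, 0), (0, -1), (0, 1)]).foldl (fun per d =>
      if PySem.Set.contains S (rc.1 + d.1, rc.2 + d.2) then per else per + 1) per) 0

-- ===== PORT B =====
-- count each shared edge once via its upper/left endpoint; perimeter = 4*len(S) - 2*adj
def perimeter_of_cells_alt (cells : List (Int × Int)) : Int :=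
  let S := PySem.Set.ofList cells
  let adj : Int := S.foldl (fun adj rc =>
    let adj := if PySem.Set.contains S (rc.1 + 1, rc.2) then adj + 1 else adj
    if PySem.Set.contains S (rc.1, rc.2 + 1) then adj + 1 else adj) 0
  4 * (PySem.Set.len S : Int) - 2 * adj

-- ===== PRECONDITION & SPEC =====
def Spec_perimeter_of_cells (cells : List (Int × Int)) (out : Int) : Prop := out = perimeter_of_cells_alt cells
instance (cells : List (Int × Int)) (out : Int) : Decidable (Spec_perimeter_of_cells cells out) := by unfold Spec_perimeter_of_cells; infer_instance

-- ===== CLAIM (what is proved, stated in full; the proofs are below) =====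
def Claim_equal_perimeter_of_cells : Prop := ∀ (cells : List (Int × Int)), Dom_perimeter_of_cells cells → Spec_perimeter_of_cells cells (perimeter_of_cells cells)

-- ===== LEMMAS AND PROOFS =====

-- countP over a duplicate-free list equals the card of the corresponding Finset filter
lemma countP_card (S : List (Int × Int)) (h : S.Nodup) (p : Int × Int → Prop) [DecidablePred p] :
    S.countP (fun x => decide (p x)) = (S.toFinset.filter p).card := by
  rw [List.countP_eq_length_filter]
  rw [show S.toFinset.filter p = (S.filter (fun x => decide (p x))).toFinset by ext x; simp]
  rw [List.toFinset_card_of_nodup (h.filter _)]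

-- the count of cells whose (+a,+b)-shift lies in S equals the count whose (-a,-b)-shift does:
-- both count the ordered adjacent pairs of S in one orientation (bijection x ↦ x + (a,b))
lemma shift_symm (S : List (Int × Int)) (h : S.Nodup) (a b : Int) :
    S.countP (fun x => decide ((x.1 + a, x.2 + b) ∈ S))
      = S.countP (fun x => decide ((x.1 - a, x.2 - b) ∈ S)) := by
  rw [countP_card S h (fun x => (x.1 + a, x.2 + b) ∈ S),
      countP_card S h (fun x => (x.1 - a, x.2 - b) ∈ S)]
  apply Finset.card_bij' (fun x _ => ((x.1 + a : Int), (x.2 + b : Int)))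
      (fun y _ => ((y.1 - a : Int), (y.2 - b : Int)))
  · intro x hx
    simp only [Finset.mem_filter, List.mem_toFinset] at *
    exact ⟨hx.2, by simpa using hx.1⟩
  · intro y hy
    simp only [Finset.mem_filter, List.mem_toFinset] at *
    exact ⟨hy.2, by simpa using hy.1⟩
  · intro x hx; simp
  · intro y hy; simp

-- a 0/1 sum counting the FALSE cases is length minus countP
lemma sum_ite01_not (l : List (Int × Int)) (c : (Int × Int) → Bool) :
    (l.map (fun x => if c x then (0:Int) else 1)).sum = (l.length : Int) - l.countP c := by
  have h1 : (fun x => if c x then (0:Int) else 1) = (fun x => if (!c x) then (1:Int) else 0) :=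
    funext fun x => by cases c x <;> simp
  rw [h1, PySem.List.sum_map_ite_one_zero]
  have h2 := List.length_eq_countP_add_countP (l := l) (p := c)
  have h3 : l.countP (fun x => !c x) = l.countP (fun x => decide ¬(c x = true)) :=
    List.countP_congr (fun x _ => by cases c x <;> simp)
  omega

theorem perimeter_of_cells_spec : Claim_equal_perimeter_of_cells := by
  intro cells _
  unfold Spec_perimeter_of_cells
  have hnd : (PySem.Set.ofList cells).Nodup := PySem.Set.nodup_ofList cells
  set S := PySem.Set.ofList cells with hSdef
  -- A side: fold → sum of per-cell absent-neighbour counts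
  have stepA : (fun (per : Int) (rc : Int × Int) =>
      ([((-1 : Int), (0 : Int)), (1, 0), (0, -1), (0, 1)]).foldl (fun per d =>
        if PySem.Set.contains S (rc.1 + d.1, rc.2 + d.2) then per else per + 1) per)
      = (fun (per : Int) (rc : Int × Int) => per +
          ((if PySem.Set.contains S (rc.1 + -1, rc.2 + 0) then (0:Int) else 1) +
           ((if PySem.Set.contains S (rc.1 + 1, rc.2 + 0) then (0:Int) else 1) +
            ((if PySem.Set.contains S (rc.1 + 0, rc.2 + -1) then (0:Int) else 1) +
             (if PySem.Set.contains S (rc.1 + 0, rc.2 + 1) then (0:Int) else 1))))) := by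
    funext per rc
    simp only [List.foldl]
    split_ifs <;> ring
  have hA : perimeter_of_cells cells = (S.map (fun rc =>
          ((if PySem.Set.contains S (rc.1 + -1, rc.2 + 0) then (0:Int) else 1) +
           ((if PySem.Set.contains S (rc.1 + 1, rc.2 + 0) then (0:Int) else 1) +
            ((if PySem.Set.contains S (rc.1 + 0, rc.2 + -1) then (0:Int) else 1) +
             (if PySem.Set.contains S (rc.1 + 0, rc.2 + 1) then (0:Int) else 1)))))).sum := by
    show S.foldl _ 0 = _
    rw [stepA, PySem.List.foldl_add]
    ring
  -- B side: fold → sum of present down/right edges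
  have stepB : (fun (adj : Int) (rc : Int × Int) =>
      let adj := if PySem.Set.contains S (rc.1 + 1, rc.2) then adj + 1 else adj
      if PySem.Set.contains S (rc.1, rc.2 + 1) then adj + 1 else adj)
      = (fun (adj : Int) (rc : Int × Int) => adj +
          ((if PySem.Set.contains S (rc.1 + 1, rc.2) then (1:Int) else 0) +
           (if PySem.Set.contains S (rc.1, rc.2 + 1) then (1:Int) else 0))) := by
    funext adj rc
    simp only []
    split_ifs <;> ring
  have hB : perimeter_of_cells_alt cells = 4 * (S.length : Int) -
      2 * ((S.map (fun rc => if PySem.Set.contains S (rc.1 + 1, rc.2) then (1:Int) else 0)).sum +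
           (S.map (fun rc => if PySem.Set.contains S (rc.1, rc.2 + 1) then (1:Int) else 0)).sum) := by
    show 4 * (PySem.Set.len S : Int) - 2 * (S.foldl _ 0) = _
    rw [stepB, PySem.List.foldl_add, PySem.List.sum_map_add_int]
    simp [PySem.Set.len]
  rw [hA, hB]
  rw [PySem.List.sum_map_add_int, PySem.List.sum_map_add_int, PySem.List.sum_map_add_int]
  rw [sum_ite01_not, sum_ite01_not, sum_ite01_not, sum_ite01_not,
      PySem.List.sum_map_ite_one_zero, PySem.List.sum_map_ite_one_zero]
  -- normalize predicates, then pair opposite directions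
  simp only [PySem.Set.contains_eq_decide, add_zero, ← Int.sub_eq_add_neg]
  have h1 := shift_symm S hnd 1 0
  have h2 := shift_symm S hnd 0 1
  simp only [add_zero, sub_zero] at h1 h2
  have e1 := List.length_eq_countP_add_countP (l := S) (p := fun x => decide ((x.1 - 1, x.2) ∈ S))
  have e2 := List.length_eq_countP_add_countP (l := S) (p := fun x => decide ((x.1 + 1, x.2) ∈ S))
  have e3 := List.length_eq_countP_add_countP (l := S) (p := fun x => decide ((x.1, x.2 - 1) ∈ S))
  have e4 := List.length_eq_countP_add_countP (l := S) (p := fun x => decide ((x.1, x.2 + 1) ∈ S))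
  omega
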